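-- pv_equiv track=rewrite | github.com/Inkmortal/LittleGPTracker-RG-Nano-Audio-In-Sampling | tools/rgnano_layout_audit.py | row_active_cells
-- ===== SOURCE A (Python) =====
-- from typing import Iterable, List, Optional, Sequence, Tuple
--
-- def row_active_cells(mask: List[List[bool]], row: int) -> int:
--     y0 = row * 8
--     y1 = min(y0 + 8, len(mask))
--     width = len(mask[0])
--     cells = 0
--     for cell_x in range(width // 8):
--         x0 = cell_x * 8
--         x1 = x0 + 8
--         ink = sum(1 for y in range(y0, y1) for x in range(x0, x1) if mask[y][x])
--         if ink >= 4:
--             cells += 1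
--     return cells
-- ===== SOURCE B (Python) =====
-- def row_active_cells(mask, row):
--     ncells = len(mask[0]) // 8
--     if ncells == 0:
--         return 0
--     counts = [0] * ncells
--     for y in range(row * 8, min(row * 8 + 8, len(mask))):
--         row_pixels = mask[y]
--         for x in range(ncells * 8):
--             if row_pixels[x]:
--                 counts[x // 8] += 1
--     return sum(1 for c in counts if c >= 4)
-- ===== Notes on version B (the rewrite author's own statement) =====
-- stated objective: alternative
-- what changed: Instead of rescanning the pixel band once per 8x8 cell (nested per-cell sums), B makes a single pass over the band accumulating a per-cell counts table indexed by x//8, then counts the table entries that reach the threshold 4.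
import Mathlib
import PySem

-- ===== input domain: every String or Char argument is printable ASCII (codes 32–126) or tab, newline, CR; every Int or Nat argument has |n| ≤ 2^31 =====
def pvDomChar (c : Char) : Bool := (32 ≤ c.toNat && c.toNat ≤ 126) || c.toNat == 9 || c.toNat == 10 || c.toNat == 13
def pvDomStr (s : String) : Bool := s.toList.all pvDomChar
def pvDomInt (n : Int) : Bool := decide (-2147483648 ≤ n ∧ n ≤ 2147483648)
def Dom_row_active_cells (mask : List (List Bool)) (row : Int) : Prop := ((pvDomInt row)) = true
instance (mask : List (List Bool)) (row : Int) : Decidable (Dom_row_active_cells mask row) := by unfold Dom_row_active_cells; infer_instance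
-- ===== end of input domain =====

-- B replaces A's per-cell rescans of the pixel band by one accumulation pass building a
-- per-cell counts table followed by a threshold-counting pass (objective: alternative).

-- ===== PORT A =====
def row_active_cells (mask : List (List Bool)) (row : Int) : Int :=
  let y0 := row * 8
  let y1 := min (y0 + 8) ((mask.length : Int))
  let width : Int := ((mask.headD []).length : Int)      -- mask[0]; [] unreachable under Pre_
  (PySem.List.pyRange 0 (PySem.Int.floordiv width 8) 1).foldl
    (fun cells cell_x =>
      let x0 := cell_x * 8
      let x1 := x0 + 8
      let ink : Int := (PySem.List.pyRange y0 y1 1).foldl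
        (fun a y => (PySem.List.pyRange x0 x1 1).foldl
          (fun a2 x =>
            if (PySem.List.pyGet? ((PySem.List.pyGet? mask y).getD []) x).getD false
            then a2 + 1 else a2) a) 0
      if 4 ≤ ink then cells + 1 else cells) 0

-- ===== PORT B =====
def row_active_cells_alt (mask : List (List Bool)) (row : Int) : Int :=
  let ncells : Int := PySem.Int.floordiv (((mask.headD []).length : Int)) 8
  if ncells = 0 then 0
  else
    let counts : List Int := List.replicate ncells.toNat 0
    let counts := (PySem.List.pyRange (row * 8) (min (row * 8 + 8) ((mask.length : Int))) 1).foldl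
      (fun counts y =>
        let rowPixels := (PySem.List.pyGet? mask y).getD []
        (PySem.List.pyRange 0 (ncells * 8) 1).foldl
          (fun counts x =>
            if (PySem.List.pyGet? rowPixels x).getD false
            then counts.modify (PySem.Int.floordiv x 8).toNat (· + 1)
            else counts) counts) counts
    counts.foldl (fun acc c => if 4 ≤ c then acc + 1 else acc) 0

-- ===== PRECONDITION & SPEC =====
-- Pre_ is exactly where the Python A returns: mask nonempty (else IndexError on mask[0]) and,
-- when there is at least one full 8-wide cell, every band row index is a valid Python index
-- (A raises IndexError on rows below -len(mask)) and each accessed row reaches the scanned width.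
def Pre_row_active_cells (mask : List (List Bool)) (row : Int) : Prop :=
  mask ≠ [] ∧
  ((mask.headD []).length / 8 = 0 ∨
    ∀ y ∈ PySem.List.pyRange (row * 8) (min (row * 8 + 8) ((mask.length : Int))) 1,
      -((mask.length : Int)) ≤ y ∧
      8 * ((mask.headD []).length / 8) ≤ ((PySem.List.pyGet? mask y).getD []).length)
instance (mask : List (List Bool)) (row : Int) : Decidable (Pre_row_active_cells mask row) := by
  unfold Pre_row_active_cells; infer_instance

def pvWitness_row_active_cells : List (List Bool) × Int :=
  ([[true, true, true, true, false, false, false, false, true],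
    [true, true, false, false, false, false, false, false, true]], 0)

def Spec_row_active_cells (mask : List (List Bool)) (row : Int) (out : Int) : Prop := out = row_active_cells_alt mask row
instance (mask : List (List Bool)) (row : Int) (out : Int) : Decidable (Spec_row_active_cells mask row out) := by unfold Spec_row_active_cells; infer_instance

-- ===== CLAIM (what is proved, stated in full; the proofs are below) =====
def Claim_equal_row_active_cells : Prop := ∀ (mask : List (List Bool)) (row : Int), Dom_row_active_cells mask row → Pre_row_active_cells mask row → Spec_row_active_cells mask row (row_active_cells mask row)

-- ===== LEMMAS AND PROOFS =====

-- B's inner accumulation fold: length is preserved and slot j gains the count of hits mapped to j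
lemma pv_modify_fold (g : Int → Bool) (f : Int → Nat) (L : List Int) :
    ∀ (c : List Int),
      (L.foldl (fun c x => if g x then c.modify (f x) (· + 1) else c) c).length = c.length ∧
      (∀ j : Nat, (∀ x ∈ L, g x = true → f x < c.length) →
        (L.foldl (fun c x => if g x then c.modify (f x) (· + 1) else c) c).getD j 0
          = c.getD j 0 + ((L.countP (fun x => g x && (f x == j))) : Int)) := by
  induction L with
  | nil => intro c; exact ⟨rfl, fun j _ => by simp⟩
  | cons x L ih =>
    intro c
    by_cases hg : g x = true
    · have hlen : (c.modify (f x) (· + 1)).length = c.length := List.length_modify ..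
      refine ⟨by simpa [hg, hlen] using (ih (c.modify (f x) (· + 1))).1, ?_⟩
      intro j hf
      have hfx : f x < c.length := hf x (by simp) hg
      have step := (ih (c.modify (f x) (· + 1))).2 j
        (fun z hz hgz => by rw [hlen]; exact hf z (by simp [hz]) hgz)
      have hmod : (c.modify (f x) (· + 1)).getD j 0
          = c.getD j 0 + (if f x == j then 1 else 0) := by
        by_cases hej : f x = j
        · subst hej
          simp [List.getD_eq_getElem?_getD,
            List.getElem?_eq_getElem hfx]
        · simp [List.getD_eq_getElem?_getD, hej]
      simp only [List.foldl_cons]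
      rw [if_pos hg, step, hmod, List.countP_cons]
      simp only [hg, Bool.true_and]
      split <;> push_cast <;> ring
    · refine ⟨by simpa [hg] using (ih c).1, ?_⟩
      intro j hf
      have step := (ih c).2 j (fun z hz hgz => hf z (by simp [hz]) hgz)
      simp only [List.foldl_cons]
      rw [if_neg hg, step, List.countP_cons]
      have hb : (g x && f x == j) = false := by
        cases hgb : g x with
        | false => simp
        | true => exact absurd hgb hg
      simp [hb]

-- the x with 0 ≤ x < 8n and x // 8 = j are exactly the cell range [8j, 8j+8)
lemma pv_countP_cell (g : Int → Bool) (j n : Nat) (hj : j < n) :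
    (PySem.List.pyRange 0 ((n : Int) * 8)).countP
        (fun x => g x && ((PySem.Int.floordiv x 8).toNat == j))
      = (PySem.List.pyRange ((j : Int) * 8) ((j : Int) * 8 + 8)).countP g := by
  rw [PySem.List.pyRange_one_append 0 ((j : Int) * 8) ((n : Int) * 8) (by positivity) (by omega),
    PySem.List.pyRange_one_append ((j : Int) * 8) ((j : Int) * 8 + 8) ((n : Int) * 8)
      (by omega) (by omega),
    List.countP_append, List.countP_append]
  have hleft : (PySem.List.pyRange 0 ((j : Int) * 8)).countP
      (fun x => g x && ((PySem.Int.floordiv x 8).toNat == j)) = 0 := by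
    rw [List.countP_eq_zero]
    intro x hx
    rw [PySem.List.mem_pyRange_one] at hx
    rw [PySem.Int.floordiv_eq_ediv_of_pos (by norm_num)]
    simp only [Bool.and_eq_true, beq_iff_eq, not_and]
    intro _
    omega
  have hright : (PySem.List.pyRange ((j : Int) * 8 + 8) ((n : Int) * 8)).countP
      (fun x => g x && ((PySem.Int.floordiv x 8).toNat == j)) = 0 := by
    rw [List.countP_eq_zero]
    intro x hx
    rw [PySem.List.mem_pyRange_one] at hx
    rw [PySem.Int.floordiv_eq_ediv_of_pos (by norm_num)]
    simp only [Bool.and_eq_true, beq_iff_eq, not_and]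
    intro _
    omega
  have hmid : (PySem.List.pyRange ((j : Int) * 8) ((j : Int) * 8 + 8)).countP
      (fun x => g x && ((PySem.Int.floordiv x 8).toNat == j))
      = (PySem.List.pyRange ((j : Int) * 8) ((j : Int) * 8 + 8)).countP g := by
    refine List.countP_congr ?_
    intro x hx
    rw [PySem.List.mem_pyRange_one] at hx
    have hd : (x / 8).toNat = j := by omega
    simp [hd]
  rw [hleft, hright, hmid]
  omega

-- B's outer fold over the band rows: slot j accumulates the per-row cell-j counts
lemma pv_outer (g : Int → Int → Bool) (n : Nat) :
    ∀ (ys : List Int) (c : List Int), c.length = n →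
      (ys.foldl (fun c y => (PySem.List.pyRange 0 ((n : Int) * 8)).foldl
          (fun c x => if g y x then c.modify (PySem.Int.floordiv x 8).toNat (· + 1) else c) c) c).length = n ∧
      (∀ j : Nat, j < n →
        (ys.foldl (fun c y => (PySem.List.pyRange 0 ((n : Int) * 8)).foldl
            (fun c x => if g y x then c.modify (PySem.Int.floordiv x 8).toNat (· + 1) else c) c) c).getD j 0
          = c.getD j 0 + (ys.map (fun y =>
              (((PySem.List.pyRange ((j : Int) * 8) ((j : Int) * 8 + 8)).countP (g y)) : Int))).sum) := by
  intro ys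
  induction ys with
  | nil => intro c hc; exact ⟨hc, fun j hj => by simp⟩
  | cons y ys ih =>
    intro c hc
    have hmf := pv_modify_fold (g y) (fun x => (PySem.Int.floordiv x 8).toNat)
      (PySem.List.pyRange 0 ((n : Int) * 8)) c
    have hfcond : ∀ x ∈ PySem.List.pyRange 0 ((n : Int) * 8), g y x = true →
        (PySem.Int.floordiv x 8).toNat < c.length := by
      intro x hx _
      rw [PySem.List.mem_pyRange_one] at hx
      rw [PySem.Int.floordiv_eq_ediv_of_pos (show (0:Int) < 8 by norm_num), hc]
      omega
    have hlen1 : ((PySem.List.pyRange 0 ((n : Int) * 8)).foldl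
        (fun c x => if g y x then c.modify (PySem.Int.floordiv x 8).toNat (· + 1) else c) c).length
        = n := by rw [hmf.1, hc]
    have hrec := ih ((PySem.List.pyRange 0 ((n : Int) * 8)).foldl
        (fun c x => if g y x then c.modify (PySem.Int.floordiv x 8).toNat (· + 1) else c) c) hlen1
    refine ⟨by simpa using hrec.1, ?_⟩
    intro j hj
    simp only [List.foldl_cons]
    rw [hrec.2 j hj, hmf.2 j hfcond, pv_countP_cell (g y) j n hj]
    simp only [List.map_cons, List.sum_cons]
    ring

-- A's per-cell ink sum as a sum of per-row counts
lemma pv_ink (g : Int → Int → Bool) (x0 : Int) :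
    ∀ (ys : List Int) (a : Int),
      ys.foldl (fun a y => (PySem.List.pyRange x0 (x0 + 8)).foldl
          (fun a2 x => if g y x then a2 + 1 else a2) a) a
        = a + (ys.map (fun y => (((PySem.List.pyRange x0 (x0 + 8)).countP (g y)) : Int))).sum := by
  intro ys
  induction ys with
  | nil => intro a; simp
  | cons y ys ih =>
    intro a
    simp only [List.foldl_cons]
    rw [PySem.List.foldl_if_add_one (g y) (PySem.List.pyRange x0 (x0 + 8)) a, ih,
      List.map_cons, List.sum_cons]
    ring

-- counting over a list of known length by its getD values
lemma pv_countP_eq_range (p : Int → Bool) :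
    ∀ (c : List Int), c.countP p = (List.range c.length).countP (fun j => p (c.getD j 0)) := by
  intro c
  induction c with
  | nil => simp
  | cons a c ih =>
    rw [List.countP_cons, List.length_cons, List.range_succ_eq_map, List.countP_cons,
      List.countP_map]
    simp only [List.getD_cons_zero, List.getD_cons_succ, Function.comp_def]
    rw [ih]

-- ===== VERDICT (by name: the statement is the Claim_ definition above) =====
theorem row_active_cells_spec : Claim_equal_row_active_cells := by
  intro mask row _ _
  unfold Spec_row_active_cells row_active_cells row_active_cells_alt
  have h8 : PySem.Int.floordiv (((mask.headD []).length : Int)) 8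
      = (((mask.headD []).length / 8 : Nat) : Int) := by
    exact_mod_cast PySem.Int.floordiv_natCast (mask.headD []).length 8
  set n : Nat := (mask.headD []).length / 8 with hn
  simp only [h8, Int.toNat_natCast]
  by_cases hn0 : n = 0
  · simp [hn0, PySem.List.pyRange_one_eq_nil]
  · rw [if_neg (by exact_mod_cast hn0)]
    have houter := pv_outer (fun y x => (PySem.List.pyGet? ((PySem.List.pyGet? mask y).getD []) x).getD false)
      n (PySem.List.pyRange (row * 8) (min (row * 8 + 8) (mask.length : Int)))
      (List.replicate n 0) (by simp)
    simp only [pv_ink]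
    simp only [PySem.List.foldl_ite_add_one]
    beta_reduce at houter
    conv_rhs => rw [pv_countP_eq_range, houter.1]
    rw [PySem.List.pyRange_zero_natCast, List.countP_map]
    congr 1
    refine congrArg _ (List.countP_congr ?_)
    intro j hj
    rw [List.mem_range] at hj
    have hrep : (List.replicate n (0:Int)).getD j 0 = 0 := by
      by_cases h : j < n <;>
        simp [List.getD_eq_getElem?_getD, h]
    rw [Function.comp_apply, houter.2 j hj, hrep]
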